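-- pv_equiv track=rewrite | github.com/timvan/hackerrank | src/matrix.py | remove_illegal_chars_between_alnum
-- ===== SOURCE A (Python) =====
-- def remove_illegal_chars_between_alnum(string: str):
--     decoded_message = ""
--     cache = ""
--
--     for c in string:
--
--         if c.isalnum():
--             if cache and not decoded_message:
--                 decoded_message += cache
--                 cache = ""
--             elif cache:
--                 decoded_message += " "
--                 cache = ""
--             decoded_message += c
--         else:
--             cache += c
--
--     return decoded_message + cache
-- ===== SOURCE B (Python) =====
-- def remove_illegal_chars_between_alnum(string: str):
--     # Run-based scan: keep the leading non-alnum run, then alternate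
--     # alnum-run / non-alnum-run, collapsing each internal non-alnum run to " ".
--     k = 0
--     while k < len(string) and not string[k].isalnum():
--         k += 1
--     if k == len(string):
--         return string
--     return string[:k] + _words(string[k:])
--
--
-- def _words(s):
--     out = ""
--     while True:
--         i = 0
--         while i < len(s) and s[i].isalnum():
--             i += 1
--         j = i
--         while j < len(s) and not s[j].isalnum():
--             j += 1
--         if j == len(s):
--             return out + s
--         out += s[:i] + " "
--         s = s[j:]
-- ===== Notes on version B (the rewrite author's own statement) =====
-- stated objective: alternative
-- what changed: A scans char-by-char with a decoded_message/cache state machine; B scans run-by-run (leading non-alnum run kept, then alternating alnum/non-alnum runs, each internal non-alnum run replaced by a single space).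
import Mathlib
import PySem

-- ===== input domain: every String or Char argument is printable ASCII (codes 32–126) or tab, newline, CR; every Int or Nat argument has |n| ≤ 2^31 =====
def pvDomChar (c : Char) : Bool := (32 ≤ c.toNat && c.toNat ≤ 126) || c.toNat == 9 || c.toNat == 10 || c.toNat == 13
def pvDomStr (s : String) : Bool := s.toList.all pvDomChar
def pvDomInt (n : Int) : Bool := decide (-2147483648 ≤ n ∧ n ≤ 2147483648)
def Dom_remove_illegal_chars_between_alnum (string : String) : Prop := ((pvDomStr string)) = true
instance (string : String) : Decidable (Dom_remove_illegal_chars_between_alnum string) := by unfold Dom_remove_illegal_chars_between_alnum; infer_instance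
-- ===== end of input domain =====

-- B replaces A's char-by-char loop with a cache string by a run-based scan
-- (leading non-alnum run kept, then alternating alnum/non-alnum runs, internal
-- non-alnum runs collapsed to one space); objective: alternative decomposition.


-- ===== PORT A =====
-- A's loop: state (decoded_message, cache); alnum chars flush the cache
-- (literally if decoded is empty, as one space otherwise), others go to cache.
def goA (d c : List Char) : List Char → List Char
  | [] => d ++ c
  | x :: xs =>
    if PySem.Chars.isalnum x then
      if c ≠ [] ∧ d = [] then goA (d ++ c ++ [x]) [] xs
      else if c ≠ [] then goA ((d ++ [' ']) ++ [x]) [] xs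
      else goA (d ++ [x]) [] xs
    else goA d (c ++ [x]) xs

def remove_illegal_chars_between_alnum (string : String) : String :=
  String.ofList (goA [] [] string.toList)

-- ===== PORT B =====
-- length of the leading alnum run (the `while … s[i].isalnum(): i += 1` scan)
def runA : List Char → Nat
  | [] => 0
  | x :: xs => if PySem.Chars.isalnum x then runA xs + 1 else 0

-- length of the leading non-alnum run (the `while … not s[j].isalnum(): j += 1` scan)
def runN : List Char → Nat
  | [] => 0
  | x :: xs => if PySem.Chars.isalnum x then 0 else runN xs + 1

-- Source B's _words loop: `out` accumulator, peel one alnum run and one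
-- non-alnum run per iteration, emit " " unless the non-alnum run is trailing.
-- each _words iteration strictly advances: j >= 1 on a nonempty string
theorem one_le_runs (x : Char) (xs : List Char) :
    1 ≤ runA (x :: xs) + runN ((x :: xs).drop (runA (x :: xs))) := by
  by_cases hx : PySem.Chars.isalnum x
  · simp only [runA, hx, if_true]
    omega
  · simp only [runA, runN, hx, Bool.false_eq_true, if_false, List.drop_zero]
    omega

def wordsGo (out s : List Char) : List Char :=
  -- i = length of the leading alnum run, j = i + length of the following non-alnum run
  if _h : runA s + runN (s.drop (runA s)) = s.length then out ++ s
  else wordsGo (out ++ s.take (runA s) ++ [' '])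
               (s.drop (runA s + runN (s.drop (runA s))))
termination_by s.length
decreasing_by
  cases s with
  | nil => exact absurd rfl _h
  | cons x xs =>
    have hj := one_le_runs x xs
    simp only [List.length_drop, List.length_cons]
    omega

def remove_illegal_chars_between_alnum_alt (string : String) : String :=
  let cs := string.toList
  let k := runN cs
  if k = cs.length then string
  else String.ofList (cs.take k ++ wordsGo [] (cs.drop k))

-- ===== PRECONDITION & SPEC =====
def Spec_remove_illegal_chars_between_alnum (string : String) (out : String) : Prop := out = remove_illegal_chars_between_alnum_alt string
instance (string : String) (out : String) : Decidable (Spec_remove_illegal_chars_between_alnum string out) := by unfold Spec_remove_illegal_chars_between_alnum; infer_instance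

-- ===== CLAIM (what is proved, stated in full; the proofs are below) =====
def Claim_equal_remove_illegal_chars_between_alnum : Prop := ∀ (string : String), Dom_remove_illegal_chars_between_alnum string → Spec_remove_illegal_chars_between_alnum string (remove_illegal_chars_between_alnum string)

-- ===== LEMMAS AND PROOFS =====

theorem wordsGo_append (s : List Char) : ∀ out, wordsGo out s = out ++ wordsGo [] s := by
  induction hn : s.length using Nat.strong_induction_on generalizing s with
  | _ n ih =>
    intro out
    subst hn
    by_cases h : runA s + runN (s.drop (runA s)) = s.length
    · conv_lhs => rw [wordsGo]
      conv_rhs => rw [wordsGo]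
      simp [h]
    · conv_lhs => rw [wordsGo]
      conv_rhs => rw [wordsGo]
      rw [dif_neg h, dif_neg h]
      have hlt : (s.drop (runA s + runN (s.drop (runA s)))).length < s.length := by
        cases s with
        | nil => exact absurd rfl h
        | cons x xs =>
          have hj := one_le_runs x xs
          simp only [List.length_drop, List.length_cons]
          omega
      rw [ih _ hlt _ rfl,
          ih _ hlt _ rfl (out := ([] : List Char) ++ s.take (runA s) ++ [' '])]
      simp

theorem runN_eq_length_of_not_any (s : List Char) (h : s.any PySem.Chars.isalnum = false) :
    runN s = s.length := by
  induction s with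
  | nil => rfl
  | cons x xs ih => simp_all [runN]

theorem runN_lt_length_of_any (s : List Char) (h : s.any PySem.Chars.isalnum = true) :
    runN s < s.length := by
  induction s with
  | nil => simp at h
  | cons x xs ih =>
    by_cases hx : PySem.Chars.isalnum x
    · simp [runN, hx]
    · have hxs : xs.any PySem.Chars.isalnum = true := by simpa [hx] using h
      have := ih hxs
      simp only [runN, hx, if_false, List.length_cons, Bool.false_eq_true]
      omega

theorem words_not_any (s : List Char) (h : s.any PySem.Chars.isalnum = false) :
    wordsGo [] s = s := by
  have hA : runA s = 0 := by
    cases s with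
    | nil => rfl
    | cons x xs => simp at h; simp [runA, h.1]
  rw [wordsGo, dif_pos]
  · simp
  · simp [hA, runN_eq_length_of_not_any s h]

theorem words_skip (s : List Char) (hany : s.any PySem.Chars.isalnum = true)
    (h : 0 < runN s) : wordsGo [] s = ' ' :: wordsGo [] (s.drop (runN s)) := by
  have hA : runA s = 0 := by
    cases s with
    | nil => simp at hany
    | cons x xs =>
      simp only [runN] at h
      split at h
      · omega
      · simp_all [runA]
  rw [wordsGo, dif_neg]
  · rw [wordsGo_append]
    simp [hA]
  · simp only [hA, Nat.zero_add, List.drop_zero]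
    exact Nat.ne_of_lt (runN_lt_length_of_any s hany)

theorem words_alnum (x : Char) (xs : List Char) (hx : PySem.Chars.isalnum x = true) :
    wordsGo [] (x :: xs) = x :: wordsGo [] xs := by
  have hi : runA (x :: xs) = runA xs + 1 := by simp [runA, hx]
  have hdrop : (x :: xs).drop (runA xs + 1) = xs.drop (runA xs) := rfl
  conv_lhs => rw [wordsGo]
  conv_rhs => rw [wordsGo]
  simp only [hi, hdrop, List.length_cons]
  by_cases hj : runA xs + runN (xs.drop (runA xs)) = xs.length
  · rw [dif_pos (by omega), dif_pos hj]
    simp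
  · rw [dif_neg (by omega), dif_neg hj]
    have hd : (x :: xs).drop (runA xs + 1 + runN (xs.drop (runA xs)))
        = xs.drop (runA xs + runN (xs.drop (runA xs))) := by
      have he : runA xs + 1 + runN (xs.drop (runA xs))
          = (runA xs + runN (xs.drop (runA xs))) + 1 := by omega
      rw [he]; rfl
    have ht : (x :: xs).take (runA xs + 1) = x :: xs.take (runA xs) :=
      List.take_succ_cons
    rw [hd, ht,
        wordsGo_append _ ([] ++ (x :: xs.take (runA xs)) ++ [' ']),
        wordsGo_append _ ([] ++ xs.take (runA xs) ++ [' '])]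
    simp

-- A's loop once decoded_message is nonempty
theorem goA_ne_nil (s : List Char) : ∀ c d, d ≠ [] →
    goA d c s =
      if s.any PySem.Chars.isalnum then
        d ++ (if c = [] ∧ runN s = 0 then [] else [' ']) ++ wordsGo [] (s.drop (runN s))
      else d ++ c ++ s := by
  induction s with
  | nil => intro c d _; simp [goA]
  | cons x xs ih =>
    intro c d hd
    by_cases hx : PySem.Chars.isalnum x
    · have hrun : runN (x :: xs) = 0 := by simp [runN, hx]
      have hxsw : wordsGo [] (x :: xs) = x :: wordsGo [] xs := words_alnum x xs hx
      rw [goA]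
      simp only [hx, if_true]
      by_cases hc : c = []
      · subst hc
        simp only [ne_eq, not_true_eq_false, false_and, if_false]
        rw [ih [] (d ++ [x]) (by simp)]
        by_cases hany : xs.any PySem.Chars.isalnum
        · by_cases h0 : runN xs = 0
          · simp [hany, hrun, h0, hxsw]
          · rw [words_skip xs hany (Nat.pos_of_ne_zero h0)] at hxsw
            simp [hany, hrun, h0, hxsw]
        · have hw := words_not_any xs (by simpa using hany)
          rw [hw] at hxsw
          simp [hany, hrun, hxsw]
      · have h1 : ¬ (c ≠ [] ∧ d = []) := by simp [hd]
        rw [if_neg h1, if_pos hc]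
        rw [ih [] ((d ++ [' ']) ++ [x]) (by simp)]
        have h2 : ¬ (c = [] ∧ runN (x :: xs) = 0) := by simp [hc]
        rw [if_neg h2]
        by_cases hany : xs.any PySem.Chars.isalnum
        · by_cases h0 : runN xs = 0
          · simp [hany, hrun, h0, hxsw]
          · rw [words_skip xs hany (Nat.pos_of_ne_zero h0)] at hxsw
            simp [hany, hrun, h0, hxsw]
        · have hw := words_not_any xs (by simpa using hany)
          rw [hw] at hxsw
          simp [hany, hrun, hxsw, hx]
    · rw [goA]
      simp only [hx, Bool.false_eq_true, if_false]
      rw [ih (c ++ [x]) d hd]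
      have hrun : runN (x :: xs) = runN xs + 1 := by simp [runN, hx]
      have hdrop : (x :: xs).drop (runN xs + 1) = xs.drop (runN xs) := rfl
      simp only [List.any_cons, hx, Bool.false_or, hrun, hdrop]
      by_cases hany : xs.any PySem.Chars.isalnum
      · simp [hany]
      · simp [hany]

-- A's loop from the start (decoded_message still empty): the leading run is kept
theorem goA_start (s : List Char) : ∀ c, goA [] c s =
    if s.any PySem.Chars.isalnum then
      c ++ s.take (runN s) ++ wordsGo [] (s.drop (runN s))
    else c ++ s := by
  induction s with
  | nil => intro c; simp [goA]
  | cons x xs ih =>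
    intro c
    by_cases hx : PySem.Chars.isalnum x
    · have hrun : runN (x :: xs) = 0 := by simp [runN, hx]
      have hxsw : wordsGo [] (x :: xs) = x :: wordsGo [] xs := words_alnum x xs hx
      have hgo : goA [] c (x :: xs) = goA (c ++ [x]) [] xs := by
        by_cases hc : c = [] <;> simp [goA, hx, hc]
      rw [hgo, goA_ne_nil xs [] (c ++ [x]) (by simp)]
      by_cases hany : xs.any PySem.Chars.isalnum
      · by_cases h0 : runN xs = 0
        · simp [hany, hrun, h0, hxsw]
        · rw [words_skip xs hany (Nat.pos_of_ne_zero h0)] at hxsw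
          simp [hany, hrun, h0, hxsw]
      · have hw := words_not_any xs (by simpa using hany)
        rw [hw] at hxsw
        simp [hany, hrun, hxsw]
    · have hrun : runN (x :: xs) = runN xs + 1 := by simp [runN, hx]
      have hgo : goA [] c (x :: xs) = goA [] (c ++ [x]) xs := by simp [goA, hx]
      rw [hgo, ih (c ++ [x])]
      have hdrop : (x :: xs).drop (runN xs + 1) = xs.drop (runN xs) := rfl
      have htake : (x :: xs).take (runN xs + 1) = x :: xs.take (runN xs) :=
        List.take_succ_cons
      simp only [List.any_cons, hx, Bool.false_or, hrun, hdrop, htake]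
      by_cases hany : xs.any PySem.Chars.isalnum <;> simp [hany]

-- ===== VERDICT (by name: the statement is the Claim_ definition above) =====
theorem remove_illegal_chars_between_alnum_spec : Claim_equal_remove_illegal_chars_between_alnum := by
  unfold Claim_equal_remove_illegal_chars_between_alnum
  intro string _
  unfold Spec_remove_illegal_chars_between_alnum
  unfold remove_illegal_chars_between_alnum remove_illegal_chars_between_alnum_alt
  rw [goA_start string.toList []]
  by_cases hany : string.toList.any PySem.Chars.isalnum
  · have hlt := runN_lt_length_of_any _ hany
    have hne : ¬ runN string.toList = string.length := by
      have hl : string.toList.length = string.length := by simp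
      omega
    simp [hany, hne]
  · have heq := runN_eq_length_of_not_any _ (by simpa using hany)
    simp [hany, heq, String.ofList_toList]
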